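-- pv_equiv track=rewrite | github.com/whanncar/coordinated_equilibria | code/l_utils.py | get_ordered_tuples
-- ===== SOURCE A (Python) =====
-- def get_ordered_tuples(s, k):
--
--   result = []
--
--   if k == 1:
--     for x in s:
--       y = []
--       y.append(x)
--       result.append(y)
--     return result
--
--   for x in s:
--     smaller = get_ordered_tuples(s, k - 1)
--     for y in smaller:
--       y.append(x)
--       result.append(y)
--   return result
-- ===== SOURCE B (Python) =====
-- def get_ordered_tuples(s, k):
--   result = [[]]
--   for _ in range(k):
--     result = [y + [x] for x in s for y in result]
--   return result
-- ===== Notes on version B (the rewrite author's own statement) =====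
-- stated objective: alternative
-- what changed: Replaces the branching recursion (which recomputes get_ordered_tuples(s, k-1) from scratch once per element of s at every level) with a bottom-up loop that computes each level exactly once from the previous one.
-- intended difference: For empty s with k <= 0, A returns [] only because its recursion body never runs, while B returns [[]], the single length-0 tuple, which is the intended value for k = 0. — e.g. on get_ordered_tuples([], 0): A returns [], B returns [[]]
import Mathlib
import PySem

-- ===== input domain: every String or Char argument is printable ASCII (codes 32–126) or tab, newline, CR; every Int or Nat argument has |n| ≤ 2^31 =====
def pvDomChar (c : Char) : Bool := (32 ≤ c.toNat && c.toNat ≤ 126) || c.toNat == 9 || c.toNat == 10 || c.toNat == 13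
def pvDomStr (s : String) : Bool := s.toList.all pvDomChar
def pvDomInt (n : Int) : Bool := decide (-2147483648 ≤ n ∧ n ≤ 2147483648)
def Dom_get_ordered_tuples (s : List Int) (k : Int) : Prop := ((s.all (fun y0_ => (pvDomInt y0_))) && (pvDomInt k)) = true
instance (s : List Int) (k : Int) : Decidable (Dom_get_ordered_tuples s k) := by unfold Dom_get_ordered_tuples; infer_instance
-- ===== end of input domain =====

-- B replaces A's branching recursion (which recomputes the (k-1)-level once per element of s)
-- with a bottom-up loop computing each level once; objective: alternative decomposition (same output-bound cost).
-- A mutates the sublists returned by its recursive calls (y.append(x)); the equivalence is about return values.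

-- ===== PORT A =====
-- fuel = k.toNat only makes the recursion total; for k ≥ 1 it never runs out.
def getOTFuel (s : List Int) : Nat → Int → List (List Int)
  | 0, _ => []
  | fuel+1, k =>
    if k = 1 then
      s.foldl (fun result x => result ++ [[x]]) []
    else
      s.foldl (fun result x =>
        (getOTFuel s fuel (k-1)).foldl (fun r y => r ++ [y ++ [x]]) result) []

def get_ordered_tuples (s : List Int) (k : Int) : List (List Int) :=
  getOTFuel s k.toNat k

-- ===== PORT B =====
def get_ordered_tuples_alt (s : List Int) (k : Int) : List (List Int) :=
  (PySem.List.pyRange 0 k 1).foldl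
    (fun result _ => s.flatMap (fun x => result.map (fun y => y ++ [x]))) [[]]

-- ===== PRECONDITION & SPEC =====
-- Pre_ admits exactly the inputs where the Python A returns: k ≥ 1, or empty s (where every loop body is skipped).
def Pre_get_ordered_tuples (s : List Int) (k : Int) : Prop := 1 ≤ k ∨ s = []
instance (s : List Int) (k : Int) : Decidable (Pre_get_ordered_tuples s k) := by unfold Pre_get_ordered_tuples; infer_instance
def pvWitness_get_ordered_tuples : List Int × Int := ([1, 2], 2)

-- For empty s with k ≤ 0, A returns [] only because its recursion body never runs, while B returns [[]],
-- the single length-0 tuple, which is the intended value for k = 0.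
def D_get_ordered_tuples (s : List Int) (k : Int) : Prop := s = [] ∧ k ≤ 0
instance (s : List Int) (k : Int) : Decidable (D_get_ordered_tuples s k) := by unfold D_get_ordered_tuples; infer_instance
def Spec_get_ordered_tuples (s : List Int) (k : Int) (out : List (List Int)) : Prop :=
  ¬ D_get_ordered_tuples s k → out = get_ordered_tuples_alt s k
instance (s : List Int) (k : Int) (out : List (List Int)) : Decidable (Spec_get_ordered_tuples s k out) := by unfold Spec_get_ordered_tuples; infer_instance
def pvDiffWitness_get_ordered_tuples : List Int × Int := ([], 0)
def pvDiffWitnessOut_get_ordered_tuples : (List (List Int)) × (List (List Int)) := ([], [[]])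

-- ===== CLAIM (what is proved, stated in full; the proofs are below) =====
def Claim_unchanged_get_ordered_tuples : Prop := ∀ (s : List Int) (k : Int), Dom_get_ordered_tuples s k → Pre_get_ordered_tuples s k → Spec_get_ordered_tuples s k (get_ordered_tuples s k)
def Claim_changed_get_ordered_tuples : Prop := Dom_get_ordered_tuples (pvDiffWitness_get_ordered_tuples.1) (pvDiffWitness_get_ordered_tuples.2) ∧ Pre_get_ordered_tuples (pvDiffWitness_get_ordered_tuples.1) (pvDiffWitness_get_ordered_tuples.2) ∧ D_get_ordered_tuples (pvDiffWitness_get_ordered_tuples.1) (pvDiffWitness_get_ordered_tuples.2) ∧ get_ordered_tuples (pvDiffWitness_get_ordered_tuples.1) (pvDiffWitness_get_ordered_tuples.2) = pvDiffWitnessOut_get_ordered_tuples.1 ∧ get_ordered_tuples_alt (pvDiffWitness_get_ordered_tuples.1) (pvDiffWitness_get_ordered_tuples.2) = pvDiffWitnessOut_get_ordered_tuples.2 ∧ pvDiffWitnessOut_get_ordered_tuples.1 ≠ pvDiffWitnessOut_get_ordered_tuples.2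
def Claim_exact_get_ordered_tuples : Prop := ∀ (s : List Int) (k : Int), Dom_get_ordered_tuples s k → Pre_get_ordered_tuples s k → D_get_ordered_tuples s k → get_ordered_tuples s k ≠ get_ordered_tuples_alt s k

-- ===== LEMMAS AND PROOFS =====

-- one level of B's loop
def otStep (s : List Int) (R : List (List Int)) : List (List Int) :=
  s.flatMap (fun x => R.map (fun y => y ++ [x]))

theorem foldl_inner (L : List (List Int)) (x : Int) (init : List (List Int)) :
    L.foldl (fun r y => r ++ [y ++ [x]]) init = init ++ L.map (fun y => y ++ [x]) := by
  induction L generalizing init with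
  | nil => simp
  | cons a t ih => simp [List.foldl, ih]

theorem foldl_outer (s : List Int) (R init : List (List Int)) :
    s.foldl (fun result x => R.foldl (fun r y => r ++ [y ++ [x]]) result) init
      = init ++ otStep s R := by
  induction s generalizing init with
  | nil => simp [otStep]
  | cons a t ih =>
    simp only [List.foldl]
    rw [foldl_inner, ih]
    simp [otStep]

theorem foldl_base (s : List Int) (init : List (List Int)) :
    s.foldl (fun result x => result ++ [[x]]) init = init ++ otStep s [[]] := by
  induction s generalizing init with
  | nil => simp [otStep]
  | cons a t ih => simp [List.foldl, ih, otStep]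

theorem getOTFuel_eq_iterate (s : List Int) (n : Nat) :
    ∀ fuel : Nat, n < fuel → getOTFuel s fuel ((n : Int) + 1) = (otStep s)^[n + 1] [[]] := by
  induction n with
  | zero =>
    intro fuel h
    obtain ⟨f, rfl⟩ := Nat.exists_eq_succ_of_ne_zero (by omega : fuel ≠ 0)
    simp only [getOTFuel, Nat.cast_zero, zero_add, reduceIte]
    rw [foldl_base]
    simp
  | succ m ih =>
    intro fuel h
    obtain ⟨f, rfl⟩ := Nat.exists_eq_succ_of_ne_zero (by omega : fuel ≠ 0)
    have hk : ((m : Int) + 1 + 1) ≠ 1 := by omega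
    have harg : ((m : Int) + 1 + 1) - 1 = (m : Int) + 1 := by ring
    have hrec := ih f (by omega)
    rw [show ((m + 1 : Nat) : Int) + 1 = (m : Int) + 1 + 1 by push_cast; ring]
    simp only [getOTFuel, hk, if_false, harg, hrec, foldl_outer, List.nil_append]
    rw [Function.iterate_succ_apply' (otStep s) (m + 1)]

theorem foldl_const_iterate (g : List (List Int) → List (List Int)) (l : List Int)
    (init : List (List Int)) :
    l.foldl (fun r _ => g r) init = g^[l.length] init := by
  induction l generalizing init with
  | nil => simp
  | cons a t ih => simp [List.foldl, ih, Function.iterate_succ_apply]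

theorem alt_eq_iterate (s : List Int) (k : Int) :
    get_ordered_tuples_alt s k = (otStep s)^[k.toNat] [[]] := by
  unfold get_ordered_tuples_alt
  rw [foldl_const_iterate, PySem.List.length_pyRange_one]
  simp only [Int.sub_zero]
  rfl

-- ===== VERDICT (by name: the statement is the Claim_ definition above) =====
theorem get_ordered_tuples_spec : Claim_unchanged_get_ordered_tuples := by
  intro s k _ hpre hD
  have hk : 1 ≤ k := by
    rcases hpre with h | h
    · exact h
    · by_contra hlt
      exact hD ⟨h, by omega⟩
  have hn : k = ((k.toNat - 1 : Nat) : Int) + 1 := by omega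
  rw [alt_eq_iterate, get_ordered_tuples]
  rw [show k.toNat = (k.toNat - 1) + 1 by omega] 
  conv_lhs => rw [hn]
  exact getOTFuel_eq_iterate s (k.toNat - 1) (k.toNat - 1 + 1) (by omega)

theorem get_ordered_tuples_changed : Claim_changed_get_ordered_tuples := by
  unfold Claim_changed_get_ordered_tuples; decide

theorem get_ordered_tuples_tight : Claim_exact_get_ordered_tuples := by
  intro s k _ _ hD
  obtain ⟨hs, hk⟩ := hD
  subst hs
  have hA : get_ordered_tuples [] k = [] := by
    unfold get_ordered_tuples
    cases h : k.toNat with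
    | zero => simp [getOTFuel]
    | succ f => simp [getOTFuel]
  have hB : get_ordered_tuples_alt [] k = [[]] := by
    rw [alt_eq_iterate]
    have : k.toNat = 0 := by omega
    simp [this]
  simp [hA, hB]
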